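-- pv_equiv track=rewrite | github.com/kmfahey/code_katas | codekatas-com_kata-14_tom-swift-under-the-milkwood/trigrams.py | update_trigrams_w_tokens_list
-- ===== SOURCE A (Python) =====
-- def update_trigrams_w_tokens_list(tokens_list, trigrams):
--     if trigrams is None:
--         trigrams = dict()
--     for index in range(0, len(tokens_list) - 2):
--         initial_pair = tuple(tokens_list[index:index+2])
--         subseq_token = tokens_list[index+2]
--         if initial_pair not in trigrams:
--             trigrams[initial_pair] = {subseq_token: 1}
--         else:
--             trigrams[initial_pair][subseq_token] = trigrams[initial_pair].get(subseq_token, 0) + 1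
--     return trigrams
-- ===== SOURCE B (Python) =====
-- def update_trigrams_w_tokens_list(tokens_list, trigrams):
--     if trigrams is None:
--         trigrams = dict()
--     # Pass 1: aggregate counts of full trigrams into a flat table.
--     counts = dict()
--     for triple in zip(tokens_list, tokens_list[1:], tokens_list[2:]):
--         counts[triple] = counts.get(triple, 0) + 1
--     # Pass 2: distribute the aggregated counts into the nested dict.
--     for (first, second, third), n in counts.items():
--         inner = trigrams.setdefault((first, second), dict())
--         inner[third] = inner.get(third, 0) + n
--     return trigrams
-- ===== Notes on version B (the rewrite author's own statement) =====
-- stated objective: alternative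
-- what changed: A updates the nested pair->token->count dict once per token position in a single pass; B first aggregates a flat frequency table of whole trigrams (one count per distinct triple) and then distributes those aggregated counts into the nested dict in a second pass, merging correctly into a passed-in dict.
import Mathlib
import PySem

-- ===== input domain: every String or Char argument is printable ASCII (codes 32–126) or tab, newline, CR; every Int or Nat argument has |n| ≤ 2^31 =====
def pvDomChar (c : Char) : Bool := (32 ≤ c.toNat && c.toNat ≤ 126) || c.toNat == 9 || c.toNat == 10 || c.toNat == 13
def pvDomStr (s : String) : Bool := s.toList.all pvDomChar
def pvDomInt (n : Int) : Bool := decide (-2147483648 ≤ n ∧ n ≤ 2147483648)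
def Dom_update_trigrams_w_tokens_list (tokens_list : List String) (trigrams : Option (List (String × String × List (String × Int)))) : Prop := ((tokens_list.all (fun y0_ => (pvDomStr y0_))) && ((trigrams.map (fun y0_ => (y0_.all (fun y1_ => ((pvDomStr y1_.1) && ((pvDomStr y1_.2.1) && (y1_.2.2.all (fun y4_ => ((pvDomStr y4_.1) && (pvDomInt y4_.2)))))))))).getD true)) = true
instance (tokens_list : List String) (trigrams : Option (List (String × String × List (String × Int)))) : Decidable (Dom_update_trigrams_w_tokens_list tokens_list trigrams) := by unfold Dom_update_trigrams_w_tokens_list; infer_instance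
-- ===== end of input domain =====

-- B replaces A's single token-by-token accumulation into the nested dict by an
-- aggregate-then-distribute two-pass scheme (flat trigram frequency table first,
-- then one nested update per DISTINCT trigram); equivalence is about the RETURN
-- value (both Pythons also mutate a passed-in dict in place, identically).

-- shared decode/encode between the assoc-list interface type and the PySem.Dict
-- the Python dict-of-dicts is ported with (forced by the type convention, used by both ports)
abbrev PvTG := PySem.Dict (String × String) (PySem.Dict String Int)

def pvToDict (trigrams : Option (List (String × String × List (String × Int)))) : PvTG :=
  match trigrams with
  | none => PySem.Dict.empty
  | some l => PySem.Dict.mk (l.map (fun e => ((e.1, e.2.1), PySem.Dict.mk e.2.2)))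

def pvFromDict (tg : PvTG) : List (String × String × List (String × Int)) :=
  tg.items.map (fun p => (p.1.1, p.1.2, p.2.items))

-- ===== PORT A =====
-- loop body of A: initial_pair = tuple(tokens_list[index:index+2]); subseq_token = tokens_list[index+2]
def pvStepA (tokens_list : List String) (tg : PvTG) (index : Int) : PvTG :=
  match PySem.List.slice tokens_list (some index) (some (index + 2)),
        PySem.List.pyGet? tokens_list (index + 2) with
  | [a, b], some c =>
      if tg.contains (a, b) = false then
        tg.insert (a, b) (PySem.Dict.mk [(c, 1)])
      else
        -- trigrams[initial_pair][subseq_token] = trigrams[initial_pair].get(subseq_token, 0) + 1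
        tg.modify (a, b) PySem.Dict.empty (fun inner => inner.modify c 0 (· + 1))
  | _, _ => tg   -- unreachable: index ranges over 0 .. len-3

def update_trigrams_w_tokens_list (tokens_list : List String) (trigrams : Option (List (String × String × List (String × Int)))) : List (String × String × List (String × Int)) :=
  pvFromDict ((PySem.List.pyRange 0 (PySem.List.len tokens_list - 2) 1).foldl (pvStepA tokens_list) (pvToDict trigrams))

-- ===== PORT B =====
-- pass 1 of B: counts[triple] = counts.get(triple, 0) + 1
def pvCount (ts : List (String × String × String)) : PySem.Dict (String × String × String) Int :=
  ts.foldl (fun d t => d.insert t (d.getD t 0 + 1)) PySem.Dict.empty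

-- pass 2 body of B: 'inner = trigrams.setdefault((first, second), dict()); inner[third] =
-- inner.get(third, 0) + n' mutates the aliased (possibly fresh) inner dict in place,
-- which functionally is Dict.modify with default {}.
def pvStepB (tg : PvTG) (p : (String × String × String) × Int) : PvTG :=
  tg.modify (p.1.1, p.1.2.1) PySem.Dict.empty
    (fun inner => inner.insert p.1.2.2 (inner.getD p.1.2.2 0 + p.2))

def update_trigrams_w_tokens_list_alt (tokens_list : List String) (trigrams : Option (List (String × String × List (String × Int)))) : List (String × String × List (String × Int)) :=
  let counts := pvCount (tokens_list.zip
    ((PySem.List.slice tokens_list (some 1) none).zip (PySem.List.slice tokens_list (some 2) none)))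
  pvFromDict (counts.items.foldl pvStepB (pvToDict trigrams))

-- ===== PRECONDITION & SPEC =====
def Spec_update_trigrams_w_tokens_list (tokens_list : List String) (trigrams : Option (List (String × String × List (String × Int)))) (out : List (String × String × List (String × Int))) : Prop := out = update_trigrams_w_tokens_list_alt tokens_list trigrams
instance (tokens_list : List String) (trigrams : Option (List (String × String × List (String × Int)))) (out : List (String × String × List (String × Int))) : Decidable (Spec_update_trigrams_w_tokens_list tokens_list trigrams out) := by unfold Spec_update_trigrams_w_tokens_list; infer_instance

-- ===== CLAIM (what is proved, stated in full; the proofs are below) =====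
def Claim_equal_update_trigrams_w_tokens_list : Prop := ∀ (tokens_list : List String) (trigrams : Option (List (String × String × List (String × Int)))), Dom_update_trigrams_w_tokens_list tokens_list trigrams → Spec_update_trigrams_w_tokens_list tokens_list trigrams (update_trigrams_w_tokens_list tokens_list trigrams)

-- ===== LEMMAS AND PROOFS =====

-- proof-side: the elementary nested update "add n to tg[(a,b)][c]"
def pvM (tg : PvTG) (t : String × String × String) (n : Int) : PvTG :=
  tg.modify (t.1, t.2.1) PySem.Dict.empty (fun i => i.modify t.2.2 0 (· + n))

def pvTrips (l : List String) : List (String × String × String) :=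
  l.zip ((l.drop 1).zip (l.drop 2))

def pvDist (C : PySem.Dict (String × String × String) Int) (tg : PvTG) : PvTG :=
  C.items.foldl pvStepB tg

-- "(a,b) is a key of tg and c a key of tg[(a,b)]"
def pvHas (tg : PvTG) (t : String × String × String) : Prop :=
  tg.contains (t.1, t.2.1) = true ∧
  (tg.getD (t.1, t.2.1) PySem.Dict.empty).contains t.2.2 = true

theorem pvStepB_eq_pvM (tg : PvTG) (p : (String × String × String) × Int) :
    pvStepB tg p = pvM tg p.1 p.2 := rfl

theorem pv_insert_insert_comm {κ ν : Type} [BEq κ] [LawfulBEq κ] (d : PySem.Dict κ ν)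
    (k1 k2 : κ) (v1 v2 : ν) (hne : k1 ≠ k2) (h : d.contains k1 = true) :
    (d.insert k1 v1).insert k2 v2 = (d.insert k2 v2).insert k1 v1 := by
  have h1 : (d.insert k1 v1).contains k2 = d.contains k2 := by
    rw [PySem.Dict.contains_insert]; simp [hne.symm]
  have h2 : (d.insert k2 v2).contains k1 = true := by
    rw [PySem.Dict.contains_insert]; simp [h]
  by_cases hc2 : d.contains k2 = true
  · apply PySem.Dict.ext
    rw [PySem.Dict.items_insert_of_contains _ _ (h1.trans hc2),
        PySem.Dict.items_insert_of_contains _ _ h,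
        PySem.Dict.items_insert_of_contains _ _ h2,
        PySem.Dict.items_insert_of_contains _ _ hc2,
        List.map_map, List.map_map]
    apply List.map_congr_left
    intro p _
    simp only [Function.comp_apply]
    by_cases e1 : p.1 = k1 <;> by_cases e2 : p.1 = k2 <;>
      simp [e1, e2, hne, hne.symm, Ne.symm]
  · have hc2' : d.contains k2 = false := by simpa using hc2
    apply PySem.Dict.ext
    rw [PySem.Dict.items_insert_of_not_contains _ _ (h1.trans hc2'),
        PySem.Dict.items_insert_of_contains _ _ h,
        PySem.Dict.items_insert_of_contains _ _ h2,
        PySem.Dict.items_insert_of_not_contains _ _ hc2',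
        List.map_append]
    simp [hne.symm]

theorem pv_modify_modify_comm {κ ν : Type} [BEq κ] [LawfulBEq κ] (d : PySem.Dict κ ν)
    (k k' : κ) (d0 : ν) (f g : ν → ν) (hne : k ≠ k') (h : d.contains k = true) :
    (d.modify k' d0 g).modify k d0 f = (d.modify k d0 f).modify k' d0 g := by
  simp only [PySem.Dict.modify]
  rw [PySem.Dict.getD_insert_of_ne _ _ _ hne, PySem.Dict.getD_insert_of_ne _ _ _ hne.symm]
  exact (pv_insert_insert_comm d k k' _ _ hne h).symm

theorem pv_modify_modify_self {κ ν : Type} [BEq κ] [LawfulBEq κ] (d : PySem.Dict κ ν)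
    (k : κ) (d0 : ν) (f g : ν → ν) :
    (d.modify k d0 f).modify k d0 g = d.modify k d0 (fun x => g (f x)) := by
  simp only [PySem.Dict.modify, PySem.Dict.getD_insert_self, PySem.Dict.insert_insert_self]

theorem pvM_comm (tg : PvTG) (t t' : String × String × String) (n m : Int)
    (hne : t ≠ t') (h : pvHas tg t) :
    pvM (pvM tg t' m) t n = pvM (pvM tg t n) t' m := by
  by_cases hp : (t.1, t.2.1) = (t'.1, t'.2.1)
  · have hc : t.2.2 ≠ t'.2.2 := by
      intro hcc
      apply hne
      obtain ⟨t1, t2, t3⟩ := t; obtain ⟨s1, s2, s3⟩ := t'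
      simp only [Prod.mk.injEq] at hp hcc ⊢
      exact ⟨hp.1, hp.2, hcc⟩
    unfold pvM
    rw [← hp, pv_modify_modify_self, pv_modify_modify_self]
    exact congrArg (tg.insert (t.1, t.2.1))
      (pv_modify_modify_comm (tg.getD (t.1, t.2.1) PySem.Dict.empty)
        t.2.2 t'.2.2 0 (· + n) (· + m) hc h.2)
  · unfold pvM
    exact pv_modify_modify_comm tg _ _ _ _ _ hp h.1

theorem pvM_succ (tg : PvTG) (t : String × String × String) (n : Int) :
    pvM (pvM tg t n) t 1 = pvM tg t (n + 1) := by
  unfold pvM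
  rw [pv_modify_modify_self]
  congr 1
  funext i
  rw [pv_modify_modify_self]
  congr 1
  funext x
  ring

theorem pvHas_pvM_self (tg : PvTG) (t : String × String × String) (n : Int) :
    pvHas (pvM tg t n) t := by
  constructor
  · unfold pvM; rw [PySem.Dict.contains_modify]; simp
  · unfold pvM
    rw [PySem.Dict.getD_modify_self, PySem.Dict.contains_modify]
    simp

theorem pvHas_pvM (tg : PvTG) (t t' : String × String × String) (m : Int)
    (h : pvHas tg t) : pvHas (pvM tg t' m) t := by
  constructor
  · unfold pvM; rw [PySem.Dict.contains_modify]; simp [h.1]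
  · unfold pvM
    by_cases hp : (t.1, t.2.1) = (t'.1, t'.2.1)
    · have h2 := h.2
      rw [hp] at h2
      rw [hp, PySem.Dict.getD_modify_self, PySem.Dict.contains_modify]
      simp [h2]
    · rw [PySem.Dict.getD_modify_of_ne _ _ _ hp]
      exact h.2

-- a pending "+ n at t" commutes out of a distribution pass that never touches t
theorem pv_dist_comm (rest : List ((String × String × String) × Int)) :
    ∀ (tg : PvTG) (t : String × String × String) (n : Int),
    (∀ p ∈ rest, p.1 ≠ t) → pvHas tg t →
    rest.foldl pvStepB (pvM tg t n) = pvM (rest.foldl pvStepB tg) t n := by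
  induction rest with
  | nil => intro tg t n _ _; simp
  | cons p r ih =>
    intro tg t n hne hhas
    simp only [List.foldl_cons]
    rw [pvStepB_eq_pvM, pvStepB_eq_pvM,
        ← pvM_comm tg t p.1 n p.2 (Ne.symm (hne p (List.mem_cons_self))) hhas]
    exact ih (pvM tg p.1 p.2) t n (fun q hq => hne q (List.mem_cons_of_mem _ hq))
      (pvHas_pvM tg t p.1 p.2 hhas)

-- bumping the count of triple t by one inside the table = one extra "+1 at t" after distributing
theorem pv_dist_bump (t : String × String × String)
    (L : List ((String × String × String) × Int)) :
    ∀ (tg : PvTG) (n : Int), (L.map Prod.fst).Nodup → (t, n) ∈ L →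
    (L.map (fun p => if p.1 == t then (t, n + 1) else p)).foldl pvStepB tg
      = pvM (L.foldl pvStepB tg) t 1 := by
  induction L with
  | nil => intro tg n _ hmem; simp at hmem
  | cons p r ih =>
    intro tg n hnd hmem
    simp only [List.map_cons] at *
    by_cases hk : p.1 = t
    · have hnotr : ∀ q ∈ r, q.1 ≠ t := by
        intro q hq he
        have : p.1 ∈ r.map Prod.fst := by
          rw [hk, ← he]; exact List.mem_map_of_mem hq
        exact (List.nodup_cons.mp hnd).1 this
      have hpn : p = (t, n) := by
        rcases List.mem_cons.mp hmem with h1 | h1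
        · exact h1.symm
        · exact absurd rfl (hnotr (t, n) h1)
      subst hpn
      simp only [List.foldl_cons, beq_self_eq_true, if_true]
      have hrid : r.map (fun p => if p.1 == t then (t, n + 1) else p) = r := by
        have := List.map_congr_left (l := r)
          (f := fun p => if p.1 == t then (t, n + 1) else p) (g := id)
          (fun q hq => by simp [hnotr q hq])
        simpa using this
      rw [hrid, pvStepB_eq_pvM, pvStepB_eq_pvM, ← pvM_succ]
      exact pv_dist_comm r (pvM tg (t, n).1 (t, n).2) t 1 hnotr (pvHas_pvM_self _ _ _)
    · have hkb : (p.1 == t) = false := by simpa using hk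
      simp only [List.foldl_cons, hkb, Bool.false_eq_true, if_false]
      have hmem' : (t, n) ∈ r := by
        rcases List.mem_cons.mp hmem with h1 | h1
        · exact absurd (congrArg Prod.fst h1).symm hk
        · exact h1
      exact ih (pvStepB tg p) n (List.nodup_cons.mp hnd).2 hmem'

-- aggregate-then-distribute = direct one-at-a-time accumulation
theorem pv_dist_count (ts : List (String × String × String)) :
    ∀ (C : PySem.Dict (String × String × String) Int) (tg : PvTG), C.keys.Nodup →
    pvDist (ts.foldl (fun d t => d.insert t (d.getD t 0 + 1)) C) tg
      = ts.foldl (fun tg t => pvM tg t 1) (pvDist C tg) := by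
  induction ts with
  | nil => intro C tg _; rfl
  | cons t ts ih =>
    intro C tg hnd
    simp only [List.foldl_cons]
    rw [ih _ tg (PySem.Dict.nodup_keys_insert _ _ _ hnd)]
    congr 1
    by_cases hc : C.contains t = true
    · obtain ⟨n, hget⟩ : ∃ n, C.get? t = some n := by
        rw [PySem.Dict.contains_eq_isSome_get?] at hc
        exact Option.isSome_iff_exists.mp hc
      have hmem : (t, n) ∈ C.items := (PySem.Dict.get?_eq_some_iff_mem_items C t n hnd).mp hget
      have hgd : C.getD t 0 = n := PySem.Dict.getD_of_get?_eq_some C 0 hget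
      unfold pvDist
      rw [PySem.Dict.items_insert_of_contains _ _ hc, hgd]
      refine pv_dist_bump t C.items tg n ?_ hmem
      simpa [PySem.Dict.keys] using hnd
    · have hc' : C.contains t = false := by simpa using hc
      unfold pvDist
      rw [PySem.Dict.items_insert_of_not_contains _ _ hc',
          PySem.Dict.getD_of_not_contains _ _ hc', List.foldl_append]
      simp only [List.foldl_cons, List.foldl_nil]
      rw [pvStepB_eq_pvM]
      norm_num

theorem pvTrips_length (l : List String) : (pvTrips l).length = l.length - 2 := by
  simp [pvTrips]; omega

theorem pvTrips_getElem (l : List String) (i : Nat) (hi : i < (pvTrips l).length) :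
    (pvTrips l)[i] = (l[i]'(by simp [pvTrips] at hi; omega),
      (l[i+1]'(by simp [pvTrips] at hi; omega), l[i+2]'(by simp [pvTrips] at hi; omega))) := by
  have e2 : 2 + i = i + 2 := by omega
  simp [pvTrips, List.getElem_zip, List.getElem_drop, e2]

-- A's loop body at a valid index is the elementary update by 1 at trips[i]
theorem pvStepA_eq (l : List String) (i : Nat) (hi : i < (pvTrips l).length) (s : PvTG) :
    pvStepA l s (i : Int) = pvM s ((pvTrips l)[i]) 1 := by
  have hlen : i + 2 < l.length := by
    have := pvTrips_length l; omega
  have hcast2 : ((i : Int) + 2) = ((i + 2 : Nat) : Int) := by push_cast; ring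
  have hslice : PySem.List.slice l (some (i : Int)) (some ((i : Int) + 2))
      = [l[i], l[i+1]] := by
    rw [hcast2, PySem.List.slice_natCast]
    have h2 : i + 2 - i = 2 := by omega
    have d1 : List.drop i l = l[i] :: List.drop (i + 1) l :=
      List.drop_eq_getElem_cons (by omega)
    have d2 : List.drop (i + 1) l = l[i+1] :: List.drop (i + 2) l :=
      List.drop_eq_getElem_cons (by omega)
    rw [h2, d1, d2]
    rfl
  have hget : PySem.List.pyGet? l ((i : Int) + 2) = some (l[i+2]) := by
    rw [hcast2, PySem.List.pyGet?_natCast]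
    simp [List.getElem?_eq_getElem hlen]
  unfold pvStepA
  rw [hslice, hget, pvTrips_getElem l i hi]
  show (if s.contains (l[i], l[i+1]) = false
        then s.insert (l[i], l[i+1]) (PySem.Dict.mk [(l[i+2], 1)])
        else s.modify (l[i], l[i+1]) PySem.Dict.empty
          (fun inner => inner.modify l[i+2] 0 (· + 1)))
      = pvM s (l[i], l[i+1], l[i+2]) 1
  by_cases hc : s.contains (l[i], l[i+1]) = false
  · rw [if_pos hc]
    unfold pvM
    simp only [PySem.Dict.modify]
    rw [PySem.Dict.getD_of_not_contains _ _ hc]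
    rfl
  · rw [if_neg hc]
    rfl

theorem pv_fold_range_eq {α β : Type} (xs : List α) (g : β → Int → β) (f : β → α → β)
    (h : ∀ (i : Nat) (hi : i < xs.length) (s : β), g s (i : Int) = f s (xs[i])) :
    ∀ s : β, (List.range xs.length).foldl (fun s (i : Nat) => g s (i : Int)) s = xs.foldl f s := by
  induction xs generalizing g with
  | nil => intro s; simp
  | cons x t ih =>
    intro s
    simp only [List.length_cons, List.range_succ_eq_map, List.foldl_cons, List.foldl_map]
    have h0 : g s ((0 : Nat) : Int) = f s x := h 0 (by simp) s
    have hb : ∀ (s : β) (i : Nat), g s ((i.succ : Nat) : Int) = g s ((i : Int) + 1) := by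
      intro s i; congr 1
    rw [h0]
    calc (List.range t.length).foldl (fun s (i : Nat) => g s ((i.succ : Nat) : Int)) (f s x)
        = (List.range t.length).foldl (fun s (i : Nat) => g s ((i : Int) + 1)) (f s x) := by
          exact PySem.List.foldl_congr_mem _ _ _ _ (fun acc i _ => hb acc i)
      _ = t.foldl f (f s x) := ih (fun s i => g s ((i : Int) + 1))
          (fun i hi s => by
            have := h (i + 1) (by simp; omega) s
            simpa [Nat.cast_add] using this) (f s x)

-- A's indexed loop = fold of the elementary update over the trigram list
theorem pvA_core (l : List String) (tg0 : PvTG) :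
    (PySem.List.pyRange 0 (PySem.List.len l - 2) 1).foldl (pvStepA l) tg0
      = (pvTrips l).foldl (fun tg t => pvM tg t 1) tg0 := by
  by_cases h2 : l.length < 2
  · have hr : PySem.List.pyRange 0 (PySem.List.len l - 2) 1 = [] := by
      simp [PySem.List.pyRange, PySem.List.len]; omega
    have ht : pvTrips l = [] := by
      have := pvTrips_length l
      exact List.eq_nil_of_length_eq_zero (by omega)
    rw [hr, ht]
    simp
  · rw [Nat.not_lt] at h2
    have hc : PySem.List.len l - 2 = ((l.length - 2 : Nat) : Int) := by
      simp [PySem.List.len]; omega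
    rw [hc, PySem.List.pyRange_zero_natCast, List.foldl_map, ← pvTrips_length l]
    exact pv_fold_range_eq (pvTrips l) (pvStepA l) (fun tg t => pvM tg t 1)
      (fun i hi s => pvStepA_eq l i hi s) tg0

theorem pvB_trips (l : List String) :
    l.zip ((PySem.List.slice l (some 1) none).zip (PySem.List.slice l (some 2) none))
      = pvTrips l := by
  simp [pvTrips, PySem.List.slice_from]

-- ===== VERDICT (by name: the statement is the Claim_ definition above) =====
theorem update_trigrams_w_tokens_list_spec : Claim_equal_update_trigrams_w_tokens_list := by
  intro l tgs _
  unfold Spec_update_trigrams_w_tokens_list update_trigrams_w_tokens_list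
    update_trigrams_w_tokens_list_alt
  rw [pvB_trips]
  have h := pv_dist_count (pvTrips l) PySem.Dict.empty (pvToDict tgs) (by
    simp [PySem.Dict.keys, PySem.Dict.empty])
  unfold pvDist at h
  rw [pvA_core]
  exact (congrArg pvFromDict h).symm
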